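-- pv_equiv track=rewrite | github.com/MrBrantCode/unitest_baseline | mut_generate/mist_train_cf/cf_11298/solution.py | count_prime_pairs
-- ===== SOURCE A (Python) =====
-- def count_prime_pairs(nums):
--     def is_prime(num):
--         """Helper function to check if a number is prime."""
--         if num < 2:
--             return False
--         for i in range(2, int(num ** 0.5) + 1):
--             if num % i == 0:
--                 return False
--         return True
--
--     primes = [num for num in nums if is_prime(num)]
--     count = sum(1 for num in nums for prime in primes if is_prime(abs(num - prime)))
--     return count
-- ===== SOURCE B (Python) =====
-- def count_prime_pairs(nums):
--     def is_prime(num):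
--         if num < 2:
--             return False
--         i = 2
--         while i * i <= num:
--             if num % i == 0:
--                 return False
--             i += 1
--         return True
--
--     cnt = {}
--     for v in nums:
--         cnt[v] = cnt.get(v, 0) + 1
--     total = 0
--     for p, cp in cnt.items():
--         if is_prime(p):
--             for v, cv in cnt.items():
--                 if is_prime(abs(v - p)):
--                     total += cv * cp
--     return total
-- ===== Notes on version B (the rewrite author's own statement) =====
-- stated objective: alternative
-- what changed: B builds a value->multiplicity counter once and sums cv*cp over distinct (value, prime-value) pairs, instead of A's generator over all occurrence pairs; primality is a plain while-loop trial division instead of A's float-sqrt-bounded range loop.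
import Mathlib
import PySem

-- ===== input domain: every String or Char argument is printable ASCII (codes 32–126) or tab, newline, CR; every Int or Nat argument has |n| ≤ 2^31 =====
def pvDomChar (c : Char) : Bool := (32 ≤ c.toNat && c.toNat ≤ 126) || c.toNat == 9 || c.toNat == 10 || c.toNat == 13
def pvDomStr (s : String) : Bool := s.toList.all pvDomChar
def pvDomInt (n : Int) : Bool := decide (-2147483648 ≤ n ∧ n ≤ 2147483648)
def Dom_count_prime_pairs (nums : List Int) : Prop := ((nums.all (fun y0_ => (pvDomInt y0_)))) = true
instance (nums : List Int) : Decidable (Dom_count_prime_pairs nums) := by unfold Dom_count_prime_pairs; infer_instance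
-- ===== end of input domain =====

-- B aggregates by distinct values (a Counter) and adds cv*cp per distinct pair of counted values, instead of A's
-- pair loop over all occurrences; equal result on every input, fewer primality tests on duplicate-heavy lists.

-- ===== PORT A =====
-- A's `for i in range(2, int(num ** 0.5) + 1): if num % i == 0: return False` / `return True`
def pvCheckA (num : Int) : List Int → Bool
  | [] => true
  | i :: rest => if PySem.Int.mod num i == 0 then false else pvCheckA num rest

-- `int(num ** 0.5)` is ported as the integer floor square root: for every num reachable here under
-- Dom_count_prime_pairs (0 ≤ num ≤ 2^32) CPython's `int(num ** 0.5)` equals math.isqrt(num), so this is exact on Dom.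
def pvIsPrimeA (num : Int) : Bool :=
  if num < 2 then false
  else pvCheckA num (PySem.List.pyRange 2 ((num.toNat.sqrt : Int) + 1))

def count_prime_pairs (nums : List Int) : Int :=
  let primes := nums.filter (fun num => pvIsPrimeA num)
  nums.foldl (fun acc num =>
    primes.foldl (fun a prime =>
      if pvIsPrimeA ((num - prime).natAbs : Int) then a + 1 else a) acc) 0

-- ===== PORT B =====
-- B's `i = 2; while i * i <= num: if num % i == 0: return False; i += 1` / `return True`
def pvTrialB (num i : Int) : Bool :=
  if _h : i * i ≤ num then
    (if PySem.Int.mod num i == 0 then false else pvTrialB num (i + 1))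
  else true
termination_by (num + 1 - i).toNat
decreasing_by
  have hi : i ≤ num := by
    rcases (by omega : i ≤ 0 ∨ 1 ≤ i) with h0 | h0
    · nlinarith [mul_self_nonneg i]
    · nlinarith [mul_le_mul_of_nonneg_left h0 (by omega : (0:Int) ≤ i)]
  omega

def pvIsPrimeB (num : Int) : Bool :=
  if num < 2 then false else pvTrialB num 2

def count_prime_pairs_alt (nums : List Int) : Int :=
  let cnt := nums.foldl (fun d v => d.insert v (d.getD v 0 + 1)) (PySem.Dict.empty : PySem.Dict Int Int)
  cnt.items.foldl (fun total pc =>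
    if pvIsPrimeB pc.1 then
      cnt.items.foldl (fun t vc =>
        if pvIsPrimeB ((vc.1 - pc.1).natAbs : Int) then t + vc.2 * pc.2 else t) total
    else total) 0

-- ===== PRECONDITION & SPEC =====
def Spec_count_prime_pairs (nums : List Int) (out : Int) : Prop := out = count_prime_pairs_alt nums
instance (nums : List Int) (out : Int) : Decidable (Spec_count_prime_pairs nums out) := by unfold Spec_count_prime_pairs; infer_instance

-- ===== CLAIM (what is proved, stated in full; the proofs are below) =====
def Claim_equal_count_prime_pairs : Prop := ∀ (nums : List Int), Dom_count_prime_pairs nums → Spec_count_prime_pairs nums (count_prime_pairs nums)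

-- ===== LEMMAS AND PROOFS =====

-- ---- the two trial-division primality tests agree ----
lemma pvCheckA_eq_all (num : Int) (l : List Int) :
    pvCheckA num l = l.all (fun i => !(PySem.Int.mod num i == 0)) := by
  induction l with
  | nil => rfl
  | cons i rest ih =>
    simp only [pvCheckA, List.all_cons]
    split <;> simp_all

lemma int_le_sqrt_iff (num i : Int) (hn : 0 ≤ num) (hi : 0 ≤ i) :
    i ≤ (num.toNat.sqrt : Int) ↔ i * i ≤ num := by
  rw [show i = (i.toNat : Int) by omega]
  rw [Int.ofNat_le, Nat.le_sqrt]
  constructor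
  · intro h
    have : ((i.toNat * i.toNat : Nat) : Int) ≤ ((num.toNat : Nat) : Int) := by exact_mod_cast h
    push_cast at this
    omega
  · intro h
    have h' : ((i.toNat * i.toNat : Nat) : Int) ≤ num := by exact_mod_cast h
    omega

lemma pvTrialB_true_iff (num i : Int) (h2 : 2 ≤ i) :
    pvTrialB num i = true ↔ ∀ j : Int, i ≤ j → j * j ≤ num → ¬ PySem.Int.mod num j = 0 := by
  unfold pvTrialB
  split
  · rename_i hle
    split
    · rename_i hmod
      simp only [beq_iff_eq] at hmod
      constructor
      · intro h; cases h
      · intro h; exact absurd hmod (h i le_rfl hle)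
    · rename_i hmod
      simp only [beq_iff_eq] at hmod
      rw [pvTrialB_true_iff num (i + 1) (by omega)]
      constructor
      · intro h j hj hjj
        rcases eq_or_lt_of_le hj with rfl | hlt
        · exact hmod
        · exact h j (by omega) hjj
      · intro h j hj hjj
        exact h j (by omega) hjj
  · rename_i hgt
    constructor
    · intro _ j hj hjj
      exfalso
      have hii : i * i ≤ j * j := mul_le_mul hj hj (by omega) (by omega)
      omega
    · intro _; rfl
termination_by (num + 1 - i).toNat
decreasing_by
  have hi : i ≤ num := by
    nlinarith [mul_le_mul_of_nonneg_left (by omega : (1:Int) ≤ i) (by omega : (0:Int) ≤ i)]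
  omega

lemma isPrime_agree (num : Int) : pvIsPrimeA num = pvIsPrimeB num := by
  unfold pvIsPrimeA pvIsPrimeB
  split
  · rfl
  · rename_i h
    rw [pvCheckA_eq_all]
    cases hTB : pvTrialB num 2 with
    | true =>
      rw [List.all_eq_true]
      intro i hi
      obtain ⟨h2i, hilt⟩ := PySem.List.mem_pyRange_one.mp hi
      have hii : i * i ≤ num := (int_le_sqrt_iff num i (by omega) (by omega)).mp (by omega)
      have := (pvTrialB_true_iff num 2 le_rfl).mp hTB i h2i hii
      simp [this]
    | false =>
      rw [List.all_eq_false]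
      have hnot : ¬ ∀ j : Int, 2 ≤ j → j * j ≤ num → ¬ PySem.Int.mod num j = 0 := by
        intro hall
        rw [← pvTrialB_true_iff num 2 le_rfl] at hall
        rw [hTB] at hall
        cases hall
      push Not at hnot
      obtain ⟨j, h2j, hjj, hmod⟩ := hnot
      refine ⟨j, ?_, ?_⟩
      · rw [PySem.List.mem_pyRange_one]
        have := (int_le_sqrt_iff num j (by omega) (by omega)).mpr hjj
        omega
      · simp [hmod]

-- ---- summation plumbing ----

-- multiplicity of v in nums, as an Int
def pvC (nums : List Int) (v : Int) : Int := (nums.count v : Int)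

-- a sum over the list equals the sum over its distinct values weighted by multiplicity
lemma sum_over_set (l : List Int) (f : Int → Int) :
    ((PySem.Set.ofList l).map (fun u => pvC l u * f u)).sum = (l.map f).sum := by
  rw [Finset.sum_list_map_count l f,
      Finset.sum_list_map_count (PySem.Set.ofList l) (fun u => pvC l u * f u)]
  have hfin : (PySem.Set.ofList l : List Int).toFinset = l.toFinset := by
    ext x; simp [List.mem_toFinset, PySem.Set.mem_ofList]
  rw [hfin]
  apply Finset.sum_congr rfl
  intro x hx
  rw [List.mem_toFinset] at hx
  rw [List.count_eq_one_of_mem (PySem.Set.nodup_ofList l) ((PySem.Set.mem_ofList l x).mpr hx)]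
  simp [pvC]

lemma foldl_if_add {α : Type} (l : List α) (c : α → Bool) (w : α → Int) (a : Int) :
    l.foldl (fun t x => if c x then t + w x else t) a
      = a + (l.map (fun x => if c x then w x else 0)).sum := by
  induction l generalizing a with
  | nil => simp
  | cons x rest ih =>
    simp only [List.foldl_cons, List.map_cons, List.sum_cons, ih]
    split <;> ring

lemma sum_sum_comm (l m : List Int) (f : Int → Int → Int) :
    (l.map (fun v => (m.map (fun p => f v p)).sum)).sum
      = (m.map (fun p => (l.map (fun v => f v p)).sum)).sum := by
  induction l with
  | nil => simp
  | cons v l' ih =>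
    simp only [List.map_cons, List.sum_cons, ih]
    exact (PySem.List.sum_map_add_int m _ _).symm

-- ---- the two programs in a common summation normal form ----
lemma A_eq (nums : List Int) :
    count_prime_pairs nums
      = (nums.map (fun v => (nums.map (fun p =>
          if pvIsPrimeB ((v - p).natAbs : Int) && pvIsPrimeB p then (1 : Int) else 0)).sum)).sum := by
  unfold count_prime_pairs
  simp only [isPrime_agree]
  simp only [PySem.List.foldl_count_if]
  rw [PySem.List.foldl_add, zero_add]
  apply congrArg List.sum
  apply List.map_congr_left
  intro v _
  rw [List.countP_filter, ← PySem.List.sum_map_ite_one_zero]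

lemma B_eq (nums : List Int) :
    count_prime_pairs_alt nums
      = ((PySem.Set.ofList nums).map (fun p =>
          if pvIsPrimeB p then
            ((PySem.Set.ofList nums).map (fun v =>
              if pvIsPrimeB ((v - p).natAbs : Int) then pvC nums v * pvC nums p else 0)).sum
          else 0)).sum := by
  simp only [count_prime_pairs_alt, PySem.Dict.foldl_insert_getD_add_one_eq_counter,
    PySem.Dict.items_counter]
  simp only [foldl_if_add, zero_add, List.map_map, Function.comp_def]
  rfl

-- ===== VERDICT (by name: the statement is the Claim_ definition above) =====
theorem count_prime_pairs_spec : Claim_equal_count_prime_pairs := by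
  intro nums _
  unfold Spec_count_prime_pairs
  rw [A_eq, B_eq, sum_sum_comm]
  rw [← sum_over_set nums (fun p => (nums.map (fun v =>
    if pvIsPrimeB ((v - p).natAbs : Int) && pvIsPrimeB p then (1 : Int) else 0)).sum)]
  apply congrArg List.sum
  apply List.map_congr_left
  intro p _
  by_cases hp : pvIsPrimeB p = true
  · simp only [hp, Bool.and_true, if_true]
    rw [← sum_over_set nums (fun v => if pvIsPrimeB ((v - p).natAbs : Int) then (1 : Int) else 0)]
    rw [mul_comm, ← List.sum_map_mul_right]
    apply congrArg List.sum
    apply List.map_congr_left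
    intro v _
    split <;> ring
  · rw [Bool.not_eq_true] at hp
    simp [hp]
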